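-- pv_equiv track=rewrite | github.com/xoniks/dita_6_loops | loops.py | fib_from_text
-- ===== SOURCE A (Python) =====
-- def fib_from_text(text_input:str, print_not_all=True)->list:
--
--     ''' This functions has one parameter it is a text
--         and returns a list of fibonaci numbers with
--         last number not bigger than the length of text_input.'''
--
--     num_list = [1]
--
--
--
--     for i in range(len(text_input)-1):
--
--         if print_not_all:
--             if num_list[-1]<len(text_input):
--                 if not(text_input[i].isspace()):
--                     if len(num_list)==1:
--                         num_list.append(1)
--                     else:
--                         num_list.append(num_list[-1]+num_list[-2])
--         else:
--             if not(text_input[i].isspace()):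
--                     if len(num_list)==1:
--                         num_list.append(1)
--                     else:
--                         num_list.append(num_list[-1]+num_list[-2])
--
--     if num_list[-1]>len(text_input):
--         num_list=num_list[:-1]
--
--     return num_list
-- ===== SOURCE B (Python) =====
-- def fib_from_text(text_input: str, print_not_all=True) -> list:
--     """Same result as A: one counting pass, then a pair-driven fibonacci loop
--     (no list indexing), early break in default mode."""
--     n = len(text_input)
--     c = sum(1 for ch in text_input[:-1] if not ch.isspace())
--     out = [1]
--     a, b = 0, 1  # the last two values of out (a = 0 while out is a singleton)
--     for _ in range(c):
--         if print_not_all and b >= n: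
--             break
--         a, b = b, a + b
--         out.append(b)
--     if b > n:
--         out.pop()
--     return out
-- ===== Notes on version B (the rewrite author's own statement) =====
-- stated objective: simpler
-- what changed: A repeatedly indexes the growing list (num_list[-1], num_list[-2]) inside an index loop over the whole text; B first counts the non-space characters of text_input[:-1], then runs a pair-driven (a, b) fibonacci loop with an early break, never indexing into the list.
import Mathlib
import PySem

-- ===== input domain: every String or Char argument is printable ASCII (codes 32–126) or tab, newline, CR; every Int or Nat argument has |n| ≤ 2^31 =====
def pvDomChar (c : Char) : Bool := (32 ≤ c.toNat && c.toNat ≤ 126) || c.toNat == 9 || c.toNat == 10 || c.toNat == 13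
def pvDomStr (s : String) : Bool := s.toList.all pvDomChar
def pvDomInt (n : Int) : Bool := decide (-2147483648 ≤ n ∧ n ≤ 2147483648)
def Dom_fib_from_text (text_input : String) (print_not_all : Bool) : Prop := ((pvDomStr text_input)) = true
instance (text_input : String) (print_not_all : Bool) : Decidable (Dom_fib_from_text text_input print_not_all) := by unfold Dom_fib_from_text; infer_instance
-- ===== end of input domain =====

-- B replaces A's index loop with list indexing by a counting pass plus a pair-driven
-- fibonacci loop with early break (objective: simpler; same result, return value only).

-- ===== PORT A =====
def fib_from_text (text_input : String) (print_not_all : Bool) : List Int :=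
  let n : Int := PySem.Str.len text_input
  let num_list : List Int := [1]
  -- num_list[-1] / num_list[-2] are always in range (the list is never empty), so pyGetD is exact
  let num_list := (PySem.List.pyRange 0 (n - 1) 1).foldl (fun num_list i =>
    if print_not_all then
      if PySem.List.pyGetD num_list (-1) 0 < n then
        if ¬ (PySem.Chars.isspace ((PySem.Str.pyGet? text_input i).getD ' ') = true) then
          if num_list.length = 1 then num_list ++ [1]
          else num_list ++ [PySem.List.pyGetD num_list (-1) 0 + PySem.List.pyGetD num_list (-2) 0]
        else num_list
      else num_list
    else
      if ¬ (PySem.Chars.isspace ((PySem.Str.pyGet? text_input i).getD ' ') = true) then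
        if num_list.length = 1 then num_list ++ [1]
        else num_list ++ [PySem.List.pyGetD num_list (-1) 0 + PySem.List.pyGetD num_list (-2) 0]
      else num_list) num_list
  if PySem.List.pyGetD num_list (-1) 0 > n then PySem.List.slice num_list none (some (-1))
  else num_list

-- ===== PORT B =====
-- the 'for _ in range(c): … break …' loop of Source B, state (out, a, b)
def fibAltLoop (n : Int) (pna : Bool) : Nat → List Int → Int → Int → List Int × Int × Int
  | 0, out, a, b => (out, a, b)
  | k + 1, out, a, b =>
    if pna ∧ n ≤ b then (out, a, b)
    else fibAltLoop n pna k (out ++ [a + b]) b (a + b)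

def fib_from_text_alt (text_input : String) (print_not_all : Bool) : List Int :=
  let n : Int := PySem.Str.len text_input
  -- sum(1 for ch in text_input[:-1] if not ch.isspace()) is the count of matching chars
  let c : Nat := (PySem.Str.slice text_input none (some (-1))).toList.countP
      (fun ch => !(PySem.Chars.isspace ch))
  match fibAltLoop n print_not_all c [1] 0 1 with
  | (out, _, b) => if b > n then out.dropLast else out   -- out.pop() drops the last element

-- ===== PRECONDITION & SPEC =====
def Spec_fib_from_text (text_input : String) (print_not_all : Bool) (out : List Int) : Prop := out = fib_from_text_alt text_input print_not_all
instance (text_input : String) (print_not_all : Bool) (out : List Int) : Decidable (Spec_fib_from_text text_input print_not_all out) := by unfold Spec_fib_from_text; infer_instance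

-- ===== CLAIM (what is proved, stated in full; the proofs are below) =====
def Claim_equal_fib_from_text : Prop := ∀ (text_input : String) (print_not_all : Bool), Dom_fib_from_text text_input print_not_all → Spec_fib_from_text text_input print_not_all (fib_from_text text_input print_not_all)

-- ===== LEMMAS AND PROOFS =====

-- A's non-space loop body, as a function of the current list only
def coreStep (L : List Int) : List Int :=
  if L.length = 1 then L ++ [1]
  else L ++ [PySem.List.pyGetD L (-1) 0 + PySem.List.pyGetD L (-2) 0]

def stepA (n : Int) (pna : Bool) (L : List Int) : List Int :=
  if pna then (if PySem.List.pyGetD L (-1) 0 < n then coreStep L else L) else coreStep L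

-- invariant tying A's list to B's pair (a, b)
def InvAB (out : List Int) (a b : Int) : Prop :=
  0 ≤ a ∧ 1 ≤ b ∧ ((out = [1] ∧ a = 0 ∧ b = 1) ∨ ∃ pre, out = pre ++ [a, b])

theorem inv_last {out : List Int} {a b : Int} (h : InvAB out a b) :
    PySem.List.pyGetD out (-1) 0 = b := by
  rcases h with ⟨_, _, h | ⟨pre, rfl⟩⟩
  · rcases h with ⟨rfl, rfl, rfl⟩; decide
  · have : pre ++ [a, b] = (pre ++ [a]) ++ [b] := by simp
    rw [this, PySem.List.pyGetD_neg_one_append_singleton]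

theorem inv_core {out : List Int} {a b : Int} (h : InvAB out a b) :
    coreStep out = out ++ [a + b] ∧ InvAB (out ++ [a + b]) b (a + b) := by
  obtain ⟨ha, hb, h | ⟨pre, rfl⟩⟩ := h
  · obtain ⟨rfl, rfl, rfl⟩ := h
    exact ⟨by decide, by norm_num, by norm_num, Or.inr ⟨[], by decide⟩⟩
  · refine ⟨?_, by omega, by omega, Or.inr ⟨pre ++ [a], by simp⟩⟩
    unfold coreStep
    have hlen : (pre ++ [a, b]).length = pre.length + 2 := by simp
    rw [if_neg (by omega)]
    have h1 : PySem.List.pyGetD (pre ++ [a, b]) (-1) 0 = b := by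
      have he : pre ++ [a, b] = (pre ++ [a]) ++ [b] := by simp
      rw [he, PySem.List.pyGetD_neg_one_append_singleton]
    have h2 : PySem.List.pyGetD (pre ++ [a, b]) (-2) 0 = a := by
      rw [PySem.List.pyGetD_neg_ofNat (pre ++ [a, b]) 2 0 (by omega) (by simp)]
      simp
    rw [h1, h2]; ring_nf

theorem loop_sim (n : Int) (pna : Bool) (c : Nat) :
    ∀ (out : List Int) (a b : Int), InvAB out a b →
      ∃ a' b', fibAltLoop n pna c out a b = ((stepA n pna)^[c] out, a', b') ∧
        InvAB ((stepA n pna)^[c] out) a' b' := by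
  induction c with
  | zero => intro out a b h; exact ⟨a, b, rfl, h⟩
  | succ k ih =>
    intro out a b h
    by_cases hbr : pna = true ∧ n ≤ b
    · -- break: A's step is the identity from now on
      have hfix : stepA n pna out = out := by
        unfold stepA
        rw [if_pos hbr.1, inv_last h, if_neg (by omega)]
      have hiter : (stepA n pna)^[k + 1] out = out := Function.iterate_fixed hfix (k + 1)
      refine ⟨a, b, ?_, ?_⟩
      · rw [hiter]; unfold fibAltLoop; rw [if_pos hbr]
      · rw [hiter]; exact h
    · obtain ⟨hcore, hinv'⟩ := inv_core h
      have hstep : stepA n pna out = out ++ [a + b] := by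
        unfold stepA
        cases pna with
        | false => simpa using hcore
        | true =>
          rw [if_pos rfl, inv_last h, if_pos (by simp at hbr; omega)]
          exact hcore
      obtain ⟨a', b', heq, hinv''⟩ := ih (out ++ [a + b]) b (a + b) hinv'
      refine ⟨a', b', ?_, ?_⟩
      · unfold fibAltLoop
        rw [if_neg (by simpa using hbr), heq, Function.iterate_succ_apply, hstep]
      · rw [Function.iterate_succ_apply, hstep]; exact hinv''

-- A's per-index body equals: skip spaces, otherwise stepA
theorem body_eq (n : Int) (pna : Bool) (L : List Int) (c : Char) :
    (if pna then
      if PySem.List.pyGetD L (-1) 0 < n then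
        if ¬ (PySem.Chars.isspace c = true) then
          if L.length = 1 then L ++ [1]
          else L ++ [PySem.List.pyGetD L (-1) 0 + PySem.List.pyGetD L (-2) 0]
        else L
      else L
    else
      if ¬ (PySem.Chars.isspace c = true) then
        if L.length = 1 then L ++ [1]
        else L ++ [PySem.List.pyGetD L (-1) 0 + PySem.List.pyGetD L (-2) 0]
      else L)
    = (if PySem.Chars.isspace c then L else stepA n pna L) := by
  unfold stepA coreStep
  split_ifs <;> rfl

-- folding the char step is iterating stepA (spaces are no-ops)
theorem foldl_chstep (n : Int) (pna : Bool) (cs : List Char) :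
    ∀ init, cs.foldl (fun L c => if PySem.Chars.isspace c then L else stepA n pna L) init
      = (stepA n pna)^[cs.countP (fun c => !(PySem.Chars.isspace c))] init := by
  induction cs with
  | nil => intro init; rfl
  | cons c cs ih =>
    intro init
    by_cases hc : PySem.Chars.isspace c = true
    · simp [List.foldl_cons, hc, ih]
    · simp only [List.foldl_cons, hc, List.countP_cons, Bool.not_eq_true] at *
      simp [ih, Function.iterate_succ_apply]

-- a fold over range m with indexing is a fold over the first m elements
theorem foldl_range_getElem {β : Type} (cs : List Char) (d : Char) (m : Nat)
    (hm : m ≤ cs.length) (F : β → Char → β) (init : β) :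
    (List.range m).foldl (fun L k => F L (cs[k]?.getD d)) init = (cs.take m).foldl F init := by
  induction m generalizing init with
  | zero => simp
  | succ k ih =>
    rw [List.range_succ, List.foldl_append, ih (by omega)]
    have hk : cs[k]? = some cs[k] := List.getElem?_eq_getElem (by omega)
    have ht : cs.take (k + 1) = cs.take k ++ [cs[k]] := by
      rw [List.take_add_one, hk]; rfl
    rw [ht, List.foldl_append]
    simp [hk]

-- ===== VERDICT (by name: the statement is the Claim_ definition above) =====
theorem fib_from_text_spec : Claim_equal_fib_from_text := by
  intro t pna _
  unfold Spec_fib_from_text fib_from_text fib_from_text_alt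
  simp only []
  set n : Int := PySem.Str.len t with hn
  set cs : List Char := t.toList with hcs
  have hlen : n = (cs.length : Int) := PySem.Str.len_eq t
  set m : Nat := (n - 1).toNat with hm
  -- A's fold = iterating stepA (count of non-space chars among the first m) times
  have hfun : (fun (x : List Int) (y : Nat) =>
      if pna then
        if PySem.List.pyGetD x (-1) 0 < n then
          if ¬ (PySem.Chars.isspace ((PySem.Str.pyGet? t ((0 : Int) + (y : Int))).getD ' ') = true) then
            if x.length = 1 then x ++ [1]
            else x ++ [PySem.List.pyGetD x (-1) 0 + PySem.List.pyGetD x (-2) 0]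
          else x
        else x
      else
        if ¬ (PySem.Chars.isspace ((PySem.Str.pyGet? t ((0 : Int) + (y : Int))).getD ' ') = true) then
          if x.length = 1 then x ++ [1]
          else x ++ [PySem.List.pyGetD x (-1) 0 + PySem.List.pyGetD x (-2) 0]
        else x)
      = (fun (L : List Int) (k : Nat) =>
          if PySem.Chars.isspace (cs[k]?.getD ' ') then L else stepA n pna L) := by
    funext L k
    have hg : PySem.Str.pyGet? t ((0 : Int) + (k : Int)) = cs[k]? := by
      rw [zero_add, PySem.Str.pyGet?_natCast, hcs]
    rw [hg]
    exact body_eq n pna L (cs[k]?.getD ' ')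
  have hA : (PySem.List.pyRange 0 (n - 1) 1).foldl (fun num_list i =>
      if pna then
        if PySem.List.pyGetD num_list (-1) 0 < n then
          if ¬ (PySem.Chars.isspace ((PySem.Str.pyGet? t i).getD ' ') = true) then
            if num_list.length = 1 then num_list ++ [1]
            else num_list ++ [PySem.List.pyGetD num_list (-1) 0 + PySem.List.pyGetD num_list (-2) 0]
          else num_list
        else num_list
      else
        if ¬ (PySem.Chars.isspace ((PySem.Str.pyGet? t i).getD ' ') = true) then
          if num_list.length = 1 then num_list ++ [1]
          else num_list ++ [PySem.List.pyGetD num_list (-1) 0 + PySem.List.pyGetD num_list (-2) 0]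
        else num_list) [1]
      = (stepA n pna)^[(cs.take m).countP (fun c => !(PySem.Chars.isspace c))] [1] := by
    rw [PySem.List.pyRange_one, List.foldl_map, show ((n - 1) - 0).toNat = m by omega, hfun]
    exact (foldl_range_getElem cs ' ' m (by simp only [hm, hlen]; omega)
      (fun L c => if PySem.Chars.isspace c then L else stepA n pna L) [1]).trans
      (foldl_chstep n pna (cs.take m) [1])
  rw [hA]
  -- the two counts agree: take (len-1) = dropLast, and B counts over the [:-1] slice
  have hcount : (PySem.Str.slice t none (some (-1))).toList.countP
      (fun ch => !(PySem.Chars.isspace ch))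
      = (cs.take m).countP (fun c => !(PySem.Chars.isspace c)) := by
    rw [PySem.Str.slice_to_neg_one, ← hcs, List.dropLast_eq_take,
        show cs.length - 1 = m from by simp only [hm, hlen]; omega]
  rw [hcount]
  -- B's loop computes the same list, and its b is A's last element
  obtain ⟨a', b', hloop, hinv⟩ := loop_sim n pna
    ((cs.take m).countP (fun c => !(PySem.Chars.isspace c))) [1] 0 1
    ⟨le_refl 0, le_refl 1, Or.inl ⟨rfl, rfl, rfl⟩⟩
  rw [hloop]
  simp only [inv_last hinv, PySem.List.slice_to_neg_one]
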